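-- pv_equiv track=rewrite | github.com/nikola-spasojevic/connect-four | src/winning_move.py | is_win_diagonally_2
-- ===== SOURCE A (Python) =====
-- def is_win_diagonally_2(board, row, col):
-- 	val = board[row][col]
-- 	count = 1
-- 	up_side, left_side = row-1, col-1
-- 	down_side, right_side = row+1, col+1
--
-- 	while (up_side >= 0 and left_side >= 0 and board[up_side][left_side] == val):
-- 		count += 1
-- 		up_side -= 1
-- 		left_side -= 1
--
-- 	while (down_side < len(board) and right_side < len(board[0]) and board[down_side][right_side] == val):
-- 		count += 1
-- 		right_side += 1
-- 		down_side += 1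
--
-- 	if count >= 4:
-- 		return True
--
-- 	return False
-- ===== SOURCE B (Python) =====
-- def is_win_diagonally_2(board, row, col):
--     n, w = len(board), len(board[0])
--     val = board[row][col]
--     # closed-form ends of the '\' diagonal segment through (row, col)
--     lo = -max(0, min(row, col))
--     hi = max(0, min(n - 1 - row, w - 1 - col))
--     # one forward pass over the diagonal, tracking the current run of val;
--     # after the target offset 0, the first mismatch ends the run containing it
--     run = 0
--     for t in range(lo, hi + 1):
--         if board[row + t][col + t] == val:
--             run += 1
--         elif t > 0:
--             break
--         else:
--             run = 0
--     return run >= 4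
-- ===== Notes on version B (the rewrite author's own statement) =====
-- stated objective: alternative
-- what changed: Replaces A's two independent outward walks with a shared counter by closed-form endpoints of the diagonal segment through the cell plus ONE forward scan over it that maintains a running run-length, resetting on mismatches before the target and breaking on the first mismatch after it. Pre_ excludes non-rectangular boards and out-of-range indices: on ragged boards A's use of len(board[0]) as the width of every row is accidental and A may raise or mix row lengths.
-- outside the precondition, e.g. on is_win_diagonally_2([[1], [1, 1, 1, 1], [0, 0, 1, 0]], 2, 3): A returns False, B raises IndexError
import Mathlib
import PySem

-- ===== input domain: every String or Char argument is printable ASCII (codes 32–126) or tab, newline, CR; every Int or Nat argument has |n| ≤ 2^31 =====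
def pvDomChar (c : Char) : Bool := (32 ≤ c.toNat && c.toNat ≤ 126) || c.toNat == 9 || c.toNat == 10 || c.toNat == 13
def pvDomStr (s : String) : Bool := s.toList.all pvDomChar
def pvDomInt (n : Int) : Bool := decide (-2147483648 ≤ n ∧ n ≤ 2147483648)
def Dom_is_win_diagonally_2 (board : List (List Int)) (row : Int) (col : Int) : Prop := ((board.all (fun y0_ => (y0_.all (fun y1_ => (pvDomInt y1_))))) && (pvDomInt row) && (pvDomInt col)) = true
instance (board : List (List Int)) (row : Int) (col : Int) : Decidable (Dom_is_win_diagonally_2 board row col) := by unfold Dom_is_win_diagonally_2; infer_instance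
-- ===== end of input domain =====

-- B replaces A's two outward walks (up-left then down-right, sharing a counter) with
-- closed-form endpoints of the '\' diagonal segment and ONE forward scan over it that
-- keeps a running run-length, resetting before the target and breaking after it
-- (objective: alternative).


-- ===== PORT A =====
-- board[u][l] as Python computes it (negative index wraps, out of range = none)
def pvCell (board : List (List Int)) (u l : Int) : Option Int :=
  PySem.List.pyGet? ((PySem.List.pyGet? board u).getD []) l

-- A's first while loop (up-left walk, accumulating count)
def pvAUp (board : List (List Int)) (val : Int) (u l count : Int) : Int :=
  if h : 0 ≤ u ∧ 0 ≤ l ∧ pvCell board u l = some val then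
    pvAUp board val (u - 1) (l - 1) (count + 1)
  else count
termination_by (u + 1).toNat
decreasing_by omega

-- A's second while loop (down-right walk, accumulating count)
def pvADown (board : List (List Int)) (val : Int) (d r count : Int) : Int :=
  if h : d < (board.length : Int) ∧ r < (((PySem.List.pyGet? board 0).getD []).length : Int)
         ∧ pvCell board d r = some val then
    pvADown board val (d + 1) (r + 1) (count + 1)
  else count
termination_by ((board.length : Int) - d).toNat
decreasing_by omega

def is_win_diagonally_2 (board : List (List Int)) (row : Int) (col : Int) : Bool :=
  let val := (pvCell board row col).getD 0
  let count := pvAUp board val (row - 1) (col - 1) 1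
  let count := pvADown board val (row + 1) (col + 1) count
  if count ≥ 4 then true else false

-- ===== PORT B =====
-- B's single forward pass over offsets t = lo..hi along the diagonal:
-- run of consecutive cells equal to val; reset on a mismatch before the target (t ≤ 0),
-- break on a mismatch after it (the Python 'break')
def pvScan (board : List (List Int)) (row col val t hi run : Int) : Int :=
  if hle : t ≤ hi then
    if pvCell board (row + t) (col + t) = some val then
      pvScan board row col val (t + 1) hi (run + 1)
    else if 0 < t then run
    else pvScan board row col val (t + 1) hi 0
  else run
termination_by (hi + 1 - t).toNat
decreasing_by all_goals omega

def is_win_diagonally_2_alt (board : List (List Int)) (row : Int) (col : Int) : Bool :=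
  let n := (board.length : Int)
  let w := (((PySem.List.pyGet? board 0).getD []).length : Int)
  let val := (pvCell board row col).getD 0
  let lo := -(max 0 (min row col))
  let hi := max 0 (min (n - 1 - row) (w - 1 - col))
  decide (pvScan board row col val lo hi 0 ≥ 4)

-- ===== PRECONDITION & SPEC =====
-- Pre_ requires a rectangular board and in-range (possibly negative, Python-style) indices;
-- it excludes some inputs on which A returns: on ragged boards A's use of len(board[0]) as the
-- width of every row is accidental (A may raise, or count across rows of different lengths).
def Pre_is_win_diagonally_2 (board : List (List Int)) (row : Int) (col : Int) : Prop :=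
  (∀ r ∈ board, r.length = (board.headD []).length) ∧
  (-(board.length : Int) ≤ row ∧ row < (board.length : Int)) ∧
  (-((board.headD []).length : Int) ≤ col ∧ col < ((board.headD []).length : Int))
instance (board : List (List Int)) (row : Int) (col : Int) : Decidable (Pre_is_win_diagonally_2 board row col) := by unfold Pre_is_win_diagonally_2; infer_instance

def pvWitness_is_win_diagonally_2 : List (List Int) × Int × Int :=
  ([[1, 0, 2], [0, 1, 2], [2, 2, 1]], 1, 1)

def Spec_is_win_diagonally_2 (board : List (List Int)) (row : Int) (col : Int) (out : Bool) : Prop := out = is_win_diagonally_2_alt board row col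
instance (board : List (List Int)) (row : Int) (col : Int) (out : Bool) : Decidable (Spec_is_win_diagonally_2 board row col out) := by unfold Spec_is_win_diagonally_2; infer_instance

-- ===== CLAIM (what is proved, stated in full; the proofs are below) =====
def Claim_equal_is_win_diagonally_2 : Prop := ∀ (board : List (List Int)) (row : Int) (col : Int), Dom_is_win_diagonally_2 board row col → Pre_is_win_diagonally_2 board row col → Spec_is_win_diagonally_2 board row col (is_win_diagonally_2 board row col)

-- ===== LEMMAS AND PROOFS =====

-- len(board[0]) as the ports read it equals the width Pre_ speaks about
theorem pvWidth_eq (board : List (List Int)) :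
    (PySem.List.pyGet? board 0).getD [] = board.headD [] := by
  rw [PySem.List.pyGet?_zero]
  cases board <;> simp

-- an in-range (possibly negative) index into a rectangular board reads 'some' cell
theorem pvCell_some (board : List (List Int)) (u l : Int)
    (hrect : ∀ r ∈ board, r.length = (board.headD []).length)
    (hu : -(board.length : Int) ≤ u) (hun : u < (board.length : Int))
    (hl : -((board.headD []).length : Int) ≤ l) (hlw : l < ((board.headD []).length : Int)) :
    pvCell board u l = some ((pvCell board u l).getD 0) := by
  unfold pvCell
  have hrow : PySem.List.pyGet? board u ≠ none := by
    intro hnone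
    rw [PySem.List.pyGet?_eq_none_iff] at hnone
    simp only [PySem.Raise.InRange] at hnone
    omega
  obtain ⟨r, hr⟩ := Option.ne_none_iff_exists'.mp hrow
  have hmem : r ∈ board := PySem.List.mem_of_pyGet?_eq_some board hr
  have hlen := hrect r hmem
  rw [hr]
  simp only [Option.getD_some]
  have hcell : PySem.List.pyGet? r l ≠ none := by
    intro hnone
    rw [PySem.List.pyGet?_eq_none_iff] at hnone
    simp only [PySem.Raise.InRange] at hnone
    omega
  obtain ⟨v, hv⟩ := Option.ne_none_iff_exists'.mp hcell
  rw [hv]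
  rfl

-- (L1) past the target, B's scan IS A's down-right walk on the same accumulator
theorem pvScan_pos (board : List (List Int)) (row col val hi : Int)
    (hhi : hi = min ((board.length : Int) - 1 - row)
                   ((((PySem.List.pyGet? board 0).getD []).length : Int) - 1 - col))
    (t run : Int) (ht : 1 ≤ t) :
    pvScan board row col val t hi run = pvADown board val (row + t) (col + t) run := by
  rw [pvScan, pvADown]
  by_cases hle : t ≤ hi
  · rw [dif_pos hle]
    by_cases hm : pvCell board (row + t) (col + t) = some val
    · rw [if_pos hm, dif_pos ⟨by omega, by omega, hm⟩]
      have := pvScan_pos board row col val hi hhi (t + 1) (run + 1) (by omega)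
      rw [this]
      ring_nf
    · rw [if_neg hm, if_pos (by omega : (0:Int) < t),
          dif_neg (by intro h; exact hm h.2.2)]
  · rw [dif_neg hle, dif_neg (by omega)]
termination_by (hi + 1 - t).toNat
decreasing_by omega

-- (L2) before the target with no mismatch left, the scan just accumulates its length
theorem pvScan_all (board : List (List Int)) (row col val hi : Int) (hhi : 0 ≤ hi)
    (t run : Int) (ht : t ≤ 0)
    (hm : ∀ j, t ≤ j → j ≤ 0 → pvCell board (row + j) (col + j) = some val) :
    pvScan board row col val t hi run = pvScan board row col val 1 hi (run + (1 - t)) := by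
  rw [pvScan]
  rw [dif_pos (by omega : t ≤ hi), if_pos (hm t le_rfl ht)]
  by_cases h0 : t = 0
  · subst h0; norm_num
  · have := pvScan_all board row col val hi hhi (t + 1) (run + 1) (by omega)
      (fun j hj hj0 => hm j (by omega) hj0)
    rw [this]
    ring_nf
termination_by (1 - t).toNat
decreasing_by omega

-- (L3) a mismatch strictly before the target resets the run: everything before the
-- last such mismatch j is irrelevant
theorem pvScan_reset (board : List (List Int)) (row col val hi : Int) (hhi : 0 ≤ hi)
    (j t run : Int) (hj : j < 0) (hmj : pvCell board (row + j) (col + j) ≠ some val)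
    (ht : t ≤ j) :
    pvScan board row col val t hi run = pvScan board row col val (j + 1) hi 0 := by
  rw [pvScan]
  rw [dif_pos (by omega : t ≤ hi)]
  by_cases hm : pvCell board (row + t) (col + t) = some val
  · rw [if_pos hm]
    have htj : t ≠ j := by intro h; exact hmj (h ▸ hm)
    exact pvScan_reset board row col val hi hhi j (t + 1) (run + 1) hj hmj (by omega)
  · rw [if_neg hm, if_neg (by omega : ¬ (0:Int) < t)]
    by_cases htj : t = j
    · subst htj; rfl
    · exact pvScan_reset board row col val hi hhi j (t + 1) 0 hj hmj (by omega)
termination_by (j - t).toNat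
decreasing_by all_goals omega

-- (L4) A's up-left walk when every cell down to the boundary offset lo matches
theorem pvAUp_all (board : List (List Int)) (row col val lo : Int)
    (hlo : lo = -(max 0 (min row col)))
    (hm : ∀ j, lo ≤ j → j < 0 → pvCell board (row + j) (col + j) = some val)
    (t c : Int) (hlt : lo ≤ t) (ht : t ≤ 0) :
    pvAUp board val (row + t - 1) (col + t - 1) c = c + (t - lo) := by
  rw [pvAUp]
  by_cases hb : lo ≤ t - 1
  · have hmm := hm (t - 1) hb (by omega)
    rw [dif_pos ⟨by omega, by omega,
        by rw [show row + t - 1 = row + (t - 1) from by ring,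
               show col + t - 1 = col + (t - 1) from by ring]; exact hmm⟩]
    have := pvAUp_all board row col val lo hlo hm (t - 1) (c + 1) hb (by omega)
    rw [show row + t - 1 - 1 = row + (t - 1) - 1 from by ring,
        show col + t - 1 - 1 = col + (t - 1) - 1 from by ring, this]
    ring_nf
  · rw [dif_neg (by intro h; exact absurd h.1 (by omega))]
    omega
termination_by (t - lo).toNat
decreasing_by omega

-- (L5) A's up-left walk when the last mismatch before the target sits at offset j
theorem pvAUp_mm (board : List (List Int)) (row col val lo j : Int)
    (hlo : lo = -(max 0 (min row col))) (hjlo : lo ≤ j) (hj : j < 0)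
    (hmj : pvCell board (row + j) (col + j) ≠ some val)
    (hm : ∀ s, j < s → s < 0 → pvCell board (row + s) (col + s) = some val)
    (t c : Int) (hjt : j < t) (ht : t ≤ 0) :
    pvAUp board val (row + t - 1) (col + t - 1) c = c + (t - 1 - j) := by
  rw [pvAUp]
  by_cases htj : t - 1 = j
  · rw [dif_neg (by
      intro h
      exact hmj (by rw [show row + j = row + t - 1 from by omega,
                        show col + j = col + t - 1 from by omega]; exact h.2.2))]
    omega
  · have hmm := hm (t - 1) (by omega) (by omega)
    rw [dif_pos ⟨by omega, by omega,
        by rw [show row + t - 1 = row + (t - 1) from by ring,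
               show col + t - 1 = col + (t - 1) from by ring]; exact hmm⟩]
    have := pvAUp_mm board row col val lo j hlo hjlo hj hmj hm (t - 1) (c + 1)
      (by omega) (by omega)
    rw [show row + t - 1 - 1 = row + (t - 1) - 1 from by ring,
        show col + t - 1 - 1 = col + (t - 1) - 1 from by ring, this]
    ring_nf
termination_by (t - j).toNat
decreasing_by omega

-- ===== VERDICT (by name: the statement is the Claim_ definition above) =====
theorem is_win_diagonally_2_spec : Claim_equal_is_win_diagonally_2 := by
  unfold Claim_equal_is_win_diagonally_2
  intro board row col _ hpre
  unfold Spec_is_win_diagonally_2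
  obtain ⟨hrect, hrow, hcol⟩ := hpre
  have hwid := pvWidth_eq board
  simp only [is_win_diagonally_2, is_win_diagonally_2_alt]
  set n : Int := (board.length : Int) with hn
  set w : Int := (((PySem.List.pyGet? board 0).getD []).length : Int) with hw
  have hww : w = ((board.headD []).length : Int) := by rw [hw, hwid]
  set val : Int := (pvCell board row col).getD 0 with hval
  have hM0 : pvCell board row col = some val :=
    pvCell_some board row col hrect hrow.1 hrow.2 (by omega) (by omega)
  set lo : Int := -(max 0 (min row col)) with hlo
  have hhi : max 0 (min (n - 1 - row) (w - 1 - col)) = min (n - 1 - row) (w - 1 - col) := by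
    omega
  rw [hhi]
  set hi : Int := min (n - 1 - row) (w - 1 - col) with hhidef
  have hhi0 : 0 ≤ hi := by omega
  by_cases hall : ∀ j, lo ≤ j → j < 0 → pvCell board (row + j) (col + j) = some val
  · -- no mismatch above the target: A's up walk runs to the boundary
    have hA : pvAUp board val (row - 1) (col - 1) 1 = 1 + (0 - lo) := by
      have := pvAUp_all board row col val lo hlo hall 0 1 (by omega) le_rfl
      rw [show row + 0 - 1 = row - 1 from by ring, show col + 0 - 1 = col - 1 from by ring] at this
      exact this
    have hB : pvScan board row col val lo hi 0 = pvScan board row col val 1 hi (0 + (1 - lo)) :=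
      pvScan_all board row col val hi hhi0 lo 0 (by omega)
        (fun j hj hj0 => by
          rcases lt_or_eq_of_le hj0 with h | h
          · exact hall j hj h
          · subst h; simpa using hM0)
    rw [hA, hB, pvScan_pos board row col val hi (by rw [hhidef, hn, hw]) 1 (0 + (1 - lo)) le_rfl]
    rw [show (0:Int) + (1 - lo) = 1 + (0 - lo) from by ring]
    by_cases hge : pvADown board val (row + 1) (col + 1) (1 + (0 - lo)) ≥ 4
    · rw [if_pos hge]; exact (decide_eq_true hge).symm
    · rw [if_neg hge]; exact (decide_eq_false hge).symm
  · -- there is a mismatch: take the greatest one, j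
    rw [not_forall] at hall
    simp only [not_forall, exists_prop] at hall
    obtain ⟨j, ⟨⟨hjlo, hj0, hjm⟩, hjmax⟩⟩ :=
      Int.exists_greatest_of_bdd (P := fun z => lo ≤ z ∧ z < 0 ∧
          pvCell board (row + z) (col + z) ≠ some val)
        ⟨0, fun z hz => by omega⟩
        ⟨hall.choose, hall.choose_spec.1, hall.choose_spec.2.1, hall.choose_spec.2.2⟩
    have habove : ∀ s, j < s → s < 0 → pvCell board (row + s) (col + s) = some val := by
      intro s hs hs0
      by_contra hneg
      have := hjmax s ⟨by omega, hs0, hneg⟩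
      omega
    have hA : pvAUp board val (row - 1) (col - 1) 1 = 1 + (0 - 1 - j) := by
      have := pvAUp_mm board row col val lo j hlo hjlo hj0 hjm habove 0 1 hj0 le_rfl
      rw [show row + 0 - 1 = row - 1 from by ring, show col + 0 - 1 = col - 1 from by ring] at this
      exact this
    have hB1 : pvScan board row col val lo hi 0 = pvScan board row col val (j + 1) hi 0 :=
      pvScan_reset board row col val hi hhi0 j lo 0 hj0 hjm hjlo
    have hB2 : pvScan board row col val (j + 1) hi 0
        = pvScan board row col val 1 hi (0 + (1 - (j + 1))) :=
      pvScan_all board row col val hi hhi0 (j + 1) 0 (by omega)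
        (fun s hs hs0 => by
          rcases lt_or_eq_of_le hs0 with h | h
          · exact habove s (by omega) h
          · subst h; simpa using hM0)
    rw [hA, hB1, hB2,
        pvScan_pos board row col val hi (by rw [hhidef, hn, hw]) 1 (0 + (1 - (j + 1))) le_rfl]
    rw [show (0:Int) + (1 - (j + 1)) = 1 + (0 - 1 - j) from by ring]
    by_cases hge : pvADown board val (row + 1) (col + 1) (1 + (0 - 1 - j)) ≥ 4
    · rw [if_pos hge]; exact (decide_eq_true hge).symm
    · rw [if_neg hge]; exact (decide_eq_false hge).symm
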